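-- pv_equiv track=rewrite | github.com/benrose258/Python | Python 3.6 Files/Personal Projects/Merge.py | dropMatches
-- ===== SOURCE A (Python) =====
-- def dropMatches(list1,list2):
--     '''Returns the number of elements that are not in both list1 and list2'''
--     list1.sort()
--     list2.sort()
--     result = []
--     i = 0
--     j = 0
--     while i < len(list1) and j < len(list2):
--         if list1[i] == list2[j]:
--             i += 1
--             j += 1
--         elif list1[i] < list2[j]:
--             result.append(list1[i])
--             i += 1
--         else:
--             result.append(list2[j])
--             j += 1
--     while i < len(list1):
--         result.append(list1[i])
--         i += 1
--     while j < len(list2):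
--         result.append(list2[j])
--         j += 1
--     return result
-- ===== SOURCE B (Python) =====
-- def dropMatches(list1, list2):
--     '''Returns the number of elements that are not in both list1 and list2'''
--     list1.sort()
--     list2.sort()
--     result = []
--     for k in sorted(set(list1 + list2)):
--         result += [k] * abs(list1.count(k) - list2.count(k))
--     return result
-- ===== Notes on version B (the rewrite author's own statement) =====
-- stated objective: simpler
-- what changed: Replaces the interleaved two-pointer merge scan (three while loops over indices) by a count-then-emit construction: for each value of the sorted value set, emit abs(count1-count2) copies; both lists are still sorted in place.
import Mathlib
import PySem

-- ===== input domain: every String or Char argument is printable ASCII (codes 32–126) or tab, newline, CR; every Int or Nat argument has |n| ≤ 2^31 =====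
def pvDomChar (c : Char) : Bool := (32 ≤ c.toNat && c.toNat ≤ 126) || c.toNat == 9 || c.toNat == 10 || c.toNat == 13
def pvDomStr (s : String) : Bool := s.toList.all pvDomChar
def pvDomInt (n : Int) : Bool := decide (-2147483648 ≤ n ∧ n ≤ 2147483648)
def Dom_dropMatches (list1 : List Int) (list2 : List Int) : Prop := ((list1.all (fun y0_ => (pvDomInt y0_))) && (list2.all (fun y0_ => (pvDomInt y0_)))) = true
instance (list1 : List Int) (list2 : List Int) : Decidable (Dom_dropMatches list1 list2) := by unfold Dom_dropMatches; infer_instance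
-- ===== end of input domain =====

-- B replaces A's two-pointer merge scan by a count-then-emit construction over the sorted value set.
-- A sorts both argument lists in place; B performs the same in-place sorts; equivalence proved is about the return value.


-- ===== PORT A =====
-- the three while loops of A, as structural recursion on the (suffix of the) two sorted lists
def pvMerge : List Int → List Int → List Int
  | [], ys => ys
  | x :: xs, [] => x :: xs
  | x :: xs, y :: ys =>
    if x = y then pvMerge xs ys
    else if x < y then x :: pvMerge xs (y :: ys)
    else y :: pvMerge (x :: xs) ys

def dropMatches (list1 : List Int) (list2 : List Int) : List Int :=
  pvMerge (PySem.List.sorted list1 (fun x => x) false) (PySem.List.sorted list2 (fun x => x) false)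

-- ===== PORT B =====
def dropMatches_alt (list1 : List Int) (list2 : List Int) : List Int :=
  let s1 := PySem.List.sorted list1 (fun x => x) false
  let s2 := PySem.List.sorted list2 (fun x => x) false
  let keys := PySem.List.sorted (PySem.Set.ofList (s1 ++ s2)) (fun x => x) false
  keys.foldl (fun result k =>
    result ++ List.replicate ((s1.count k : Int) - (s2.count k : Int)).natAbs k) []

-- ===== PRECONDITION & SPEC =====
def Spec_dropMatches (list1 : List Int) (list2 : List Int) (out : List Int) : Prop := out = dropMatches_alt list1 list2
instance (list1 : List Int) (list2 : List Int) (out : List Int) : Decidable (Spec_dropMatches list1 list2 out) := by unfold Spec_dropMatches; infer_instance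

-- ===== CLAIM (what is proved, stated in full; the proofs are below) =====
def Claim_equal_dropMatches : Prop := ∀ (list1 : List Int) (list2 : List Int), Dom_dropMatches list1 list2 → Spec_dropMatches list1 list2 (dropMatches list1 list2)

-- ===== LEMMAS AND PROOFS =====

theorem pvMerge_mem {a : Int} : ∀ {xs ys : List Int}, a ∈ pvMerge xs ys → a ∈ xs ∨ a ∈ ys := by
  intro xs ys
  fun_induction pvMerge xs ys <;> simp_all <;> tauto

theorem pvMerge_count (k : Int) : ∀ (xs ys : List Int), xs.Pairwise (· ≤ ·) → ys.Pairwise (· ≤ ·) →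
    (pvMerge xs ys).count k = ((xs.count k : Int) - (ys.count k : Int)).natAbs := by
  intro xs ys
  fun_induction pvMerge xs ys with
  | case1 ys => intro _ _; simp
  | case2 x xs => intro _ _; simp
  | case3 xs y ys ih =>
    intro h1 h2
    rw [List.pairwise_cons] at h1 h2
    rw [ih h1.2 h2.2]
    by_cases hk : y = k <;> simp [List.count_cons, hk]
  | case4 x xs y ys hxy hlt ih =>
    intro h1 h2
    rw [List.pairwise_cons] at h1
    have hih := ih h1.2 h2
    by_cases hk : x = k
    · subst hk
      rw [List.pairwise_cons] at h2
      have hyx : ¬ (y = x) := by omega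
      have h0 : List.count x ys = 0 := by
        rw [List.count_eq_zero]
        intro hmem
        have := h2.1 x hmem; omega
      simp [h0, hyx] at hih ⊢
      omega
    · simp [List.count_cons, hk, hih]
  | case5 x xs y ys hxy hlt ih =>
    intro h1 h2
    rw [List.pairwise_cons] at h2
    have hih := ih h1 h2.2
    by_cases hk : y = k
    · subst hk
      rw [List.pairwise_cons] at h1
      have h0 : List.count y xs = 0 := by
        rw [List.count_eq_zero]
        intro hmem
        have := h1.1 y hmem; omega
      simp [h0, hxy] at hih ⊢
      omega
    · simp [List.count_cons, hk, hih]

theorem pvMerge_sorted : ∀ (xs ys : List Int), xs.Pairwise (· ≤ ·) → ys.Pairwise (· ≤ ·) →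
    (pvMerge xs ys).Pairwise (· ≤ ·) := by
  intro xs ys
  fun_induction pvMerge xs ys with
  | case1 ys => intro _ h; exact h
  | case2 x xs => intro h _; exact h
  | case3 xs y ys ih =>
    intro h1 h2
    rw [List.pairwise_cons] at h1 h2
    exact ih h1.2 h2.2
  | case4 x xs y ys hxy hlt ih =>
    intro h1 h2
    rw [List.pairwise_cons] at h1
    refine List.pairwise_cons.mpr ⟨?_, ih h1.2 h2⟩
    intro a ha
    rcases pvMerge_mem ha with h | h
    · exact h1.1 a h
    · rcases List.mem_cons.mp h with rfl | h
      · omega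
      · rw [List.pairwise_cons] at h2
        have := h2.1 a h; omega
  | case5 x xs y ys hxy hlt ih =>
    intro h1 h2
    rw [List.pairwise_cons] at h2
    refine List.pairwise_cons.mpr ⟨?_, ih h1 h2.2⟩
    intro a ha
    rcases pvMerge_mem ha with h | h
    · rcases List.mem_cons.mp h with rfl | h
      · omega
      · rw [List.pairwise_cons] at h1
        have := h1.1 a h; omega
    · exact h2.1 a h

theorem flat_count (n : Int → Nat) (k : Int) : ∀ (keys : List Int), keys.Nodup →
    (keys.flatMap (fun j => List.replicate (n j) j)).count k = if k ∈ keys then n k else 0 := by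
  intro keys
  induction keys with
  | nil => simp
  | cons j keys ih =>
    intro hnd
    rw [List.nodup_cons] at hnd
    rw [List.flatMap_cons, List.count_append, ih hnd.2]
    by_cases hk : k = j
    · subst hk
      simp [hnd.1]
    · simp [List.count_replicate, hk, Ne.symm hk]

theorem flat_sorted (n : Int → Nat) : ∀ (keys : List Int), keys.Pairwise (· < ·) →
    (keys.flatMap (fun j => List.replicate (n j) j)).Pairwise (· ≤ ·) := by
  intro keys
  induction keys with
  | nil => simp
  | cons j keys ih =>
    intro hp
    rw [List.pairwise_cons] at hp
    rw [List.flatMap_cons]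
    rw [List.pairwise_append]
    refine ⟨List.pairwise_replicate.mpr (Or.inr le_rfl), ih hp.2, ?_⟩
    intro a ha b hb
    have ha' : a = j := List.eq_of_mem_replicate ha
    rcases List.mem_flatMap.mp hb with ⟨j', hj', hb'⟩
    have hb' : b = j' := List.eq_of_mem_replicate hb'
    subst ha'; subst hb'
    exact le_of_lt (hp.1 _ hj')

-- ===== VERDICT (by name: the statement is the Claim_ definition above) =====
theorem dropMatches_spec : Claim_equal_dropMatches := by
  intro list1 list2 _
  unfold Spec_dropMatches dropMatches dropMatches_alt
  set s1 := PySem.List.sorted list1 (fun x => x) false with hs1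
  set s2 := PySem.List.sorted list2 (fun x => x) false with hs2
  set keys := PySem.List.sorted (PySem.Set.ofList (s1 ++ s2)) (fun x => x) false with hkeys
  have hkeyslt : keys.Pairwise (· < ·) := PySem.List.sorted_ofList_pairwise_lt (s1 ++ s2)
  have hkeysnd : keys.Nodup := hkeyslt.imp (fun h => ne_of_lt h)
  have hs1p : s1.Pairwise (· ≤ ·) := by
    have := PySem.List.sorted_pairwise list1 (fun x => x)
    simpa using this
  have hs2p : s2.Pairwise (· ≤ ·) := by
    have := PySem.List.sorted_pairwise list2 (fun x => x)
    simpa using this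
  rw [PySem.List.foldl_append_eq_flatMap, List.nil_append]
  have hmemkeys : ∀ k : Int, k ∈ keys ↔ (k ∈ s1 ∨ k ∈ s2) := by
    intro k
    rw [hkeys, PySem.List.mem_sorted, PySem.Set.mem_ofList, List.mem_append]
  refine PySem.List.eq_of_perm_of_pairwise_le_of_injective (fun x => x) (fun a b h => h) ?_ (pvMerge_sorted s1 s2 hs1p hs2p) (flat_sorted _ keys hkeyslt)
  rw [List.perm_iff_count]
  intro k
  rw [pvMerge_count k s1 s2 hs1p hs2p, flat_count _ k keys hkeysnd]
  by_cases hk : k ∈ keys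
  · simp [hk]
  · have : k ∉ s1 ∧ k ∉ s2 := by
      have := (hmemkeys k).not
      tauto
    rw [List.count_eq_zero.mpr this.1, List.count_eq_zero.mpr this.2]
    simp [hk]
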